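-- pv_equiv track=rewrite | github.com/miewliie/california_fire | california_fire/social/social_composer.py | compose_reply_message
-- ===== SOURCE A (Python) =====
-- def compose_reply_message(replies: list[str]) -> list[str]:
--     """Compose reply(s) for the new fire"""
--     reply_list = []
--     compose_replies = []
--     for reply in replies:
--         if len(compose_replies) == 3:
--             reply_set = '\n'.join(compose_replies)
--             reply_list.append(reply_set)
--             compose_replies = []
--
--         compose_replies.append(reply)
--
--     if compose_replies:
--         reply_set = '\n'.join(compose_replies)
--         reply_list.append(reply_set)
--
--     return reply_list
-- ===== SOURCE B (Python) =====
-- def compose_reply_message(replies: list[str]) -> list[str]: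
--     """Compose reply(s) for the new fire"""
--     return ['\n'.join(replies[i:i + 3]) for i in range(0, len(replies), 3)]
-- ===== Notes on version B (the rewrite author's own statement) =====
-- stated objective: simpler
-- what changed: Replaces the running buffer with length==3 flush checks and a trailing flush by striding over indices in steps of 3 and joining each slice replies[i:i+3]; no accumulator state is maintained.
import Mathlib
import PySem

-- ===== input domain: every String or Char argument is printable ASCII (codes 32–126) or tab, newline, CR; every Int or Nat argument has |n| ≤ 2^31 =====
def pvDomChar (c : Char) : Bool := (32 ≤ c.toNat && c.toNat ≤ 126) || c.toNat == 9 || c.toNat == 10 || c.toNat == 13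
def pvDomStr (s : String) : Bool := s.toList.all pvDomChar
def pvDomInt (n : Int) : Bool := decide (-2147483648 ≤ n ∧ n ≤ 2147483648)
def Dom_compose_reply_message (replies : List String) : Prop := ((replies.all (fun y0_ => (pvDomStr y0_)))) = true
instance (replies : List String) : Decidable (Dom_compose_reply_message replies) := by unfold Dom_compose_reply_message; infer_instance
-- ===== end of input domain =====

-- B replaces A's running buffer / length==3 flush / trailing flush by a stride-3
-- index comprehension joining each slice replies[i:i+3]; objective: simpler.


-- ===== PORT A =====
-- loop body: flush the buffer into reply_list when it holds 3, then append the reply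
def composeA_step (p : List String × List String) (reply : String) : List String × List String :=
  if p.2.length = 3 then (p.1 ++ [PySem.Str.join "\n" p.2], [reply]) else (p.1, p.2 ++ [reply])

def compose_reply_message (replies : List String) : List String :=
  let p := replies.foldl composeA_step ([], [])
  if p.2 = [] then p.1 else p.1 ++ [PySem.Str.join "\n" p.2]

-- ===== PORT B =====
def compose_reply_message_alt (replies : List String) : List String :=
  (PySem.List.pyRange 0 (PySem.List.len replies) 3).map
    (fun i => PySem.Str.join "\n" (PySem.List.slice replies (some i) (some (i + 3))))

-- ===== PRECONDITION & SPEC =====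
def Spec_compose_reply_message (replies : List String) (out : List String) : Prop := out = compose_reply_message_alt replies
instance (replies : List String) (out : List String) : Decidable (Spec_compose_reply_message replies out) := by unfold Spec_compose_reply_message; infer_instance

-- ===== CLAIM (what is proved, stated in full; the proofs are below) =====
def Claim_equal_compose_reply_message : Prop := ∀ (replies : List String), Dom_compose_reply_message replies → Spec_compose_reply_message replies (compose_reply_message replies)

-- ===== LEMMAS AND PROOFS =====

-- proof-side normal form: chunk-of-3 recursion both programs are shown equal to
def chunks3 : List String → List String
  | [] => []
  | x :: xs => PySem.Str.join "\n" ((x :: xs).take 3) :: chunks3 ((x :: xs).drop 3)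
termination_by xs => xs.length
decreasing_by simp

-- A's final flush, as a function of the loop state
def finA (p : List String × List String) : List String :=
  if p.2 = [] then p.1 else p.1 ++ [PySem.Str.join "\n" p.2]

theorem chunks3_nil : chunks3 [] = [] := by
  rw [chunks3.eq_def]

theorem chunks3_unfold (replies : List String) (h : replies ≠ []) :
    chunks3 replies =
      PySem.Str.join "\n" (replies.take 3) :: chunks3 (replies.drop 3) := by
  cases replies with
  | nil => exact absurd rfl h
  | cons x xs => rw [chunks3.eq_def]

-- loop invariant: folding A's step from state (rl, buf) with |buf| ≤ 3 and then
-- flushing equals rl followed by chunking buf ++ xs into groups of 3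
theorem fold_eq_chunks (xs : List String) : ∀ (rl buf : List String), buf.length ≤ 3 →
    finA (xs.foldl composeA_step (rl, buf)) = rl ++ chunks3 (buf ++ xs) := by
  induction xs with
  | nil =>
    intro rl buf hlen
    by_cases hb : buf = []
    · simp [hb, finA, chunks3_nil]
    · simp only [List.foldl_nil, List.append_nil, finA, if_neg hb]
      rw [chunks3_unfold buf hb]
      rw [List.take_of_length_le hlen, List.drop_eq_nil_of_le hlen, chunks3_nil]
  | cons x xs ih =>
    intro rl buf hlen
    by_cases h3 : buf.length = 3
    · simp only [List.foldl_cons, composeA_step, h3, reduceIte]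
      rw [ih (rl ++ [PySem.Str.join "\n" buf]) [x] (by simp)]
      rw [chunks3_unfold (buf ++ x :: xs) (by simp)]
      rw [List.take_append_of_le_length (by omega), List.drop_append_of_le_length (by omega)]
      rw [List.take_of_length_le (by omega), List.drop_eq_nil_of_le (by omega)]
      simp
    · simp only [List.foldl_cons, composeA_step, if_neg h3]
      rw [ih rl (buf ++ [x]) (by simp; omega)]
      simp

-- chunks3 in indexed form: the k-th chunk is (drop 3k).take 3, for m = ceil(len/3)
theorem chunks3_eq_range (m : Nat) : ∀ (xs : List String), m = (xs.length + 2) / 3 →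
    chunks3 xs = (List.range m).map (fun k => PySem.Str.join "\n" ((xs.drop (3 * k)).take 3)) := by
  induction m with
  | zero =>
    intro xs hm
    have : xs.length = 0 := by omega
    rw [List.eq_nil_of_length_eq_zero this, chunks3_nil]
    simp
  | succ m ih =>
    intro xs hm
    have hne : xs ≠ [] := by
      intro h; rw [h] at hm; simp at hm
    rw [chunks3_unfold xs hne, List.range_succ_eq_map, List.map_cons, List.map_map]
    have hlen : 1 ≤ xs.length := by
      cases xs with
      | nil => exact absurd rfl hne
      | cons a l => simp
    rw [ih (xs.drop 3) (by simp; omega)]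
    have htail : List.map (fun k => PySem.Str.join "\n" (List.take 3 (List.drop (3 * k) (List.drop 3 xs)))) (List.range m)
        = List.map ((fun k => PySem.Str.join "\n" (List.take 3 (List.drop (3 * k) xs))) ∘ Nat.succ) (List.range m) := by
      apply List.map_congr_left
      intro a _
      simp only [Function.comp_apply, List.drop_drop]
      have h' : 3 + 3 * a = 3 * a.succ := by omega
      rw [h']
    rw [htail]
    simp

-- B's port, reduced to the same indexed form
theorem alt_eq_chunks3 (replies : List String) :
    compose_reply_message_alt replies = chunks3 replies := by
  unfold compose_reply_message_alt
  rw [PySem.List.pyRange_of_pos 0 (PySem.List.len replies) (by omega), List.map_map]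
  rw [chunks3_eq_range ((replies.length + 2) / 3) replies rfl]
  have hM : (if (0:Int) < PySem.List.len replies then
      ((PySem.List.len replies - 0 + 3 - 1) / 3).toNat else 0) = (replies.length + 2) / 3 := by
    rw [PySem.List.len_eq]
    split_ifs with h <;> omega
  rw [hM]
  apply List.map_congr_left
  intro k _
  simp only [Function.comp_apply]
  have e := PySem.List.slice_natCast_add (xs := replies) (j := 3 * k) (n := 3)
  push_cast at e
  simp only [zero_add]
  rw [e]

-- ===== VERDICT (by name: the statement is the Claim_ definition above) =====
theorem compose_reply_message_spec : Claim_equal_compose_reply_message := by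
  intro replies _
  unfold Spec_compose_reply_message compose_reply_message
  rw [alt_eq_chunks3]
  simpa [finA] using fold_eq_chunks replies [] [] (by simp)
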